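-- pv_equiv track=rewrite | github.com/DarkRoku12/rate-limiter-sw | rate_limiter.py | sort_deque
-- ===== SOURCE A (Python) =====
-- from collections import deque
--
-- def sort_deque( dq: deque ) -> deque:
--   """We only need to sort the last element in the deque if it is smaller than the previous one"""
--   idx = len(dq) - 1
--   if idx < 1:
--     return dq
--
--   last = dq[idx]
--   while idx and last < dq[idx - 1]:
--     dq[idx], dq[idx - 1] = dq[idx - 1], last
--     idx -= 1
--   return dq
-- ===== SOURCE B (Python) =====
-- from collections import deque
--
-- def sort_deque(dq: deque) -> deque:
--   """Pop the last element and re-insert it with deque end operations: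
--   pop larger tail elements onto a stack, append the element, push them back."""
--   if len(dq) < 2:
--     return dq
--   last = dq.pop()
--   moved = []
--   while dq and last < dq[-1]:
--     moved.append(dq.pop())
--   dq.append(last)
--   dq.extend(reversed(moved))
--   return dq
-- ===== Notes on version B (the rewrite author's own statement) =====
-- stated objective: alternative
-- what changed: Instead of bubbling the last element leftwards with indexed swaps, B pops the last element, pops the strictly-greater tail elements onto a stack with O(1) deque end operations, then appends the element and pushes the popped ones back in order.
import Mathlib
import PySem

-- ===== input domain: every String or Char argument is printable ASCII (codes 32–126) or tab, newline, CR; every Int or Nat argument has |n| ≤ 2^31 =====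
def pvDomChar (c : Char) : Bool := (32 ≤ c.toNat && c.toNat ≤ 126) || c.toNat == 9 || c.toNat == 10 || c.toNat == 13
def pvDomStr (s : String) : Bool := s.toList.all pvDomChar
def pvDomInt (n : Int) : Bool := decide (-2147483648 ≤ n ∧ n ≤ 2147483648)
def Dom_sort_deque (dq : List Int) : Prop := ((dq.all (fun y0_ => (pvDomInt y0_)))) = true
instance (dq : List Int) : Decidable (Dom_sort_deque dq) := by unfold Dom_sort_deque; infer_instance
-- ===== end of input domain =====

-- B replaces A's index-swap bubbling by pop/append end operations on the deque; same return
-- value, and the same final deque state in Python (both mutate dq in place identically).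

-- ===== PORT A =====
-- A's while loop: idx counts down, swapping dq[idx] and dq[idx-1] while last < dq[idx-1].
def sortLoopA (dq : List Int) (last : Int) : Nat → List Int
  | 0 => dq
  | i + 1 =>
    let prev := (PySem.List.pyGet? dq (i : Int)).getD 0   -- dq[idx-1]; always in range here
    if last < prev then
      sortLoopA ((dq.set (i + 1) prev).set i last) last i
    else dq

def sort_deque (dq : List Int) : List Int :=
  let idx : Int := (dq.length : Int) - 1
  if idx < 1 then dq
  else
    let last := (PySem.List.pyGet? dq idx).getD 0
    sortLoopA dq last idx.toNat

-- ===== PORT B =====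
-- B's while loop: pop elements greater than `last` from the end onto `moved`,
-- then append `last` followed by the popped elements in their original order.
def altLoop (ys : List Int) (last : Int) (moved : List Int) : List Int :=
  match h : ys.getLast? with
  | none => last :: moved
  | some x =>
    if last < x then altLoop ys.dropLast last (x :: moved)
    else ys ++ last :: moved
termination_by ys.length
decreasing_by
  have : ys ≠ [] := by intro hn; simp [hn] at h
  simpa [List.length_dropLast] using Nat.sub_lt (List.length_pos_iff.mpr this) one_pos

def sort_deque_alt (dq : List Int) : List Int :=
  if dq.length < 2 then dq
  else altLoop dq.dropLast ((dq.getLast?).getD 0) []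

-- ===== PRECONDITION & SPEC =====
def Spec_sort_deque (dq : List Int) (out : List Int) : Prop := out = sort_deque_alt dq
instance (dq : List Int) (out : List Int) : Decidable (Spec_sort_deque dq out) := by unfold Spec_sort_deque; infer_instance

-- ===== CLAIM (what is proved, stated in full; the proofs are below) =====
def Claim_equal_sort_deque : Prop := ∀ (dq : List Int), Dom_sort_deque dq → Spec_sort_deque dq (sort_deque dq)

-- ===== LEMMAS AND PROOFS =====

-- One-step unfolding lemmas for B's loop.
theorem altLoop_nil (last : Int) (moved : List Int) : altLoop [] last moved = last :: moved := by
  simp [altLoop]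

theorem altLoop_concat (zs : List Int) (x last : Int) (moved : List Int) :
    altLoop (zs ++ [x]) last moved =
      if last < x then altLoop zs last (x :: moved) else zs ++ [x] ++ last :: moved := by
  rw [altLoop]
  split
  · next h => simp [List.getLast?_concat] at h
  · next y h =>
      rw [List.getLast?_concat] at h
      cases h
      simp [List.dropLast_concat]

-- A's bubbling over prefix ys (with `last` sitting right after it) equals B's pop/push loop.
theorem loop_eq (ys : List Int) : ∀ (last : Int) (rest : List Int),
    sortLoopA (ys ++ last :: rest) last ys.length = altLoop ys last rest := by
  induction ys using List.reverseRecOn with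
  | nil => intro last rest; simp [sortLoopA, altLoop_nil]
  | append_singleton zs x ih =>
    intro last rest
    have hlen : (zs ++ [x]).length = zs.length + 1 := by simp
    rw [hlen, altLoop_concat]
    have hget : PySem.List.pyGet? ((zs ++ [x]) ++ last :: rest) (zs.length : Int)
        = some x := by
      have he : (zs ++ [x]) ++ last :: rest = zs ++ x :: (last :: rest) := by simp
      rw [he]
      exact PySem.List.pyGet?_append_length zs (last :: rest) x
    unfold sortLoopA
    rw [hget]
    simp only [Option.getD_some]
    by_cases hlt : last < x
    · have hset : (((zs ++ [x]) ++ last :: rest).set (zs.length + 1) x).set zs.length last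
          = zs ++ last :: x :: rest := by
        have e1 : (zs ++ [x]) ++ last :: rest = zs ++ x :: last :: rest := by simp
        rw [e1]
        have e2 : zs ++ x :: last :: rest = (zs ++ [x]) ++ last :: rest := by simp
        rw [show zs.length + 1 = (zs ++ [x]).length by simp, e2,
          List.set_append_right _ _ (by simp)]
        simp [List.set_append_right]
      simp only [if_pos hlt, hset]
      exact ih last (x :: rest)
    · simp [if_neg hlt]

-- ===== VERDICT (by name: the statement is the Claim_ definition above) =====
theorem sort_deque_spec : Claim_equal_sort_deque := by
  intro dq _
  unfold Spec_sort_deque sort_deque sort_deque_alt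
  by_cases h2 : dq.length < 2
  · have h : (dq.length : Int) - 1 < 1 := by omega
    simp [h, h2]
  · have hne : dq ≠ [] := by intro h; simp [h] at h2
    obtain ⟨ys, x, rfl⟩ : ∃ ys x, dq = ys ++ [x] :=
      ⟨dq.dropLast, dq.getLast hne, (List.dropLast_concat_getLast hne).symm⟩
    have hidx : ¬ (((ys ++ [x]).length : Int) - 1 < 1) := by
      simp at h2 ⊢; omega
    rw [if_neg hidx, if_neg h2]
    have hidx2 : ((ys ++ [x]).length : Int) - 1 = (ys.length : Int) := by
      simp
    rw [hidx2, show ys ++ [x] = ys ++ x :: [] from rfl,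
      PySem.List.pyGet?_append_length ys [] x]
    simp only [Option.getD_some, Int.toNat_natCast, List.dropLast_concat,
      List.getLast?_concat]
    exact loop_eq ys x []
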